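-- pv_equiv track=rewrite | github.com/wetherc/adventOfCode | 2018/02/solution.py | get_unique_occurrences
-- ===== SOURCE A (Python) =====
-- import itertools
--
-- def get_unique_occurrences(input):
--     occurrences = [
--         (g[0], len(list(g[1])))
--         for g in itertools.groupby(sorted(input))
--     ]
--
--     twos = [twos for twos in occurrences if twos[1] == 2]
--     threes = [threes for threes in occurrences if threes[1] == 3]
--
--     return (
--         True if len(twos) > 0 else False,
--         True if len(threes) > 0 else False
--     )
-- ===== SOURCE B (Python) =====
-- def get_unique_occurrences(input):
--     chars = set(input)
--     return (
--         any(input.count(c) == 2 for c in chars),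
--         any(input.count(c) == 3 for c in chars),
--     )
-- ===== Notes on version B (the rewrite author's own statement) =====
-- stated objective: simpler
-- what changed: Replaces A's sort + itertools.groupby run-length table and two filter passes by direct repeated scanning: for each distinct character test input.count(c) == 2 / == 3 with any(); no sorting and no intermediate table.
import Mathlib
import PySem

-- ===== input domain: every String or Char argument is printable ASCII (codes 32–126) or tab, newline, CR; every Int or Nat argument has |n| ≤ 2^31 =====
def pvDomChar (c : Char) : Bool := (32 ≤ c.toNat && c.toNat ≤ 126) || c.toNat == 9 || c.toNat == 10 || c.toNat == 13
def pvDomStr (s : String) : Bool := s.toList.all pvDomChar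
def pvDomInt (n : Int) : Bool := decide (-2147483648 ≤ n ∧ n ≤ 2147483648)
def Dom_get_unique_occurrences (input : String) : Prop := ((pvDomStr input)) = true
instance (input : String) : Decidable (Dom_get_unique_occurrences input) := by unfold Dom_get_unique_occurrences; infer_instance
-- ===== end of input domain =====

-- B replaces A's sort + groupby frequency table by repeated counting scans over the
-- distinct characters; objective: simpler (shorter, no intermediate table). Equivalence proved for all inputs.

-- ===== PORT A =====
-- hand port of `[(g[0], len(list(g[1]))) for g in itertools.groupby(xs)]` on a list of
-- chars: run-length encoding of maximal runs of equal adjacent elements, exact.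
def pvRuns : List Char → List (Char × Nat)
  | [] => []
  | c :: rest =>
    match pvRuns rest with
    | [] => [(c, 1)]
    | (d, k) :: t => if c = d then (d, k + 1) :: t else (c, 1) :: (d, k) :: t

def get_unique_occurrences (input : String) : List Bool :=
  let occurrences := pvRuns (PySem.List.sorted input.toList (fun x => x) false)
  let twos := occurrences.filter (fun p => p.2 == 2)
  let threes := occurrences.filter (fun p => p.2 == 3)
  [if twos.length > 0 then true else false,
   if threes.length > 0 then true else false]

-- ===== PORT B =====
def get_unique_occurrences_alt (input : String) : List Bool :=
  let chars : PySem.Set Char := PySem.Set.ofList input.toList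
  [chars.any (fun c => PySem.Str.count input (String.ofList [c]) == 2),
   chars.any (fun c => PySem.Str.count input (String.ofList [c]) == 3)]

-- ===== PRECONDITION & SPEC =====
def Spec_get_unique_occurrences (input : String) (out : List Bool) : Prop := out = get_unique_occurrences_alt input
instance (input : String) (out : List Bool) : Decidable (Spec_get_unique_occurrences input out) := by unfold Spec_get_unique_occurrences; infer_instance

-- ===== CLAIM (what is proved, stated in full; the proofs are below) =====
def Claim_equal_get_unique_occurrences : Prop := ∀ (input : String), Dom_get_unique_occurrences input → Spec_get_unique_occurrences input (get_unique_occurrences input)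

-- ===== LEMMAS AND PROOFS =====

theorem pvRuns_cons (c : Char) (rest : List Char) :
    pvRuns (c :: rest) = match pvRuns rest with
      | [] => [(c, 1)]
      | (d, k) :: t => if c = d then (d, k + 1) :: t else (c, 1) :: (d, k) :: t := rfl

theorem pvRuns_head (c : Char) (rest : List Char) :
    ∃ k t, pvRuns (c :: rest) = (c, k) :: t := by
  induction rest generalizing c with
  | nil => exact ⟨1, [], rfl⟩
  | cons d r ih =>
    obtain ⟨k, t, h⟩ := ih d
    by_cases hcd : c = d
    · exact ⟨k + 1, t, by rw [pvRuns_cons, h]; simp [hcd]⟩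
    · exact ⟨1, (d, k) :: t, by rw [pvRuns_cons, h]; simp [hcd]⟩

theorem pvRuns_cons_gt (rest : List Char) (c : Char)
    (hs : (c :: rest).Pairwise (· ≤ ·)) (k : Nat) (t : List (Char × Nat))
    (h : pvRuns (c :: rest) = (c, k) :: t) : ∀ p ∈ t, c < p.1 := by
  induction rest generalizing c k t with
  | nil =>
    have he : pvRuns [c] = [(c, 1)] := rfl
    rw [he] at h
    injection h with h1 h2
    subst h2
    simp
  | cons d r ih =>
    obtain ⟨k', t', hd⟩ := pvRuns_head d r
    have hred : pvRuns (c :: d :: r) =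
        if c = d then (d, k' + 1) :: t' else (c, 1) :: (d, k') :: t' := by
      rw [pvRuns_cons, hd]
    rw [hred] at h
    by_cases hcd : c = d
    · rw [if_pos hcd] at h
      subst hcd
      injection h with h1 h2
      injection h1 with _ hk
      subst hk; subst h2
      exact ih c hs.of_cons _ _ hd
    · rw [if_neg hcd] at h
      injection h with h1 h2
      subst h2
      intro p hp
      have hcled : c ≤ d := (List.pairwise_cons.mp hs).1 d (by simp)
      rcases List.mem_cons.mp hp with h1 | h1
      · subst h1
        exact lt_of_le_of_ne hcled hcd
      · have := ih d hs.of_cons k' t' hd p h1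
        exact lt_of_le_of_lt hcled this

theorem pvRuns_count (l : List Char) (hs : l.Pairwise (· ≤ ·)) :
    ∀ p ∈ pvRuns l, p.2 = l.count p.1 ∧ p.1 ∈ l := by
  induction l with
  | nil => simp [pvRuns]
  | cons c rest ih =>
    intro p hp
    cases rest with
    | nil =>
      have he : pvRuns [c] = [(c, 1)] := rfl
      rw [he] at hp
      simp at hp
      subst hp
      simp [List.count_cons]
    | cons d r =>
      obtain ⟨k, t, hh⟩ := pvRuns_head d r
      have hs' : (d :: r).Pairwise (· ≤ ·) := hs.of_cons
      have hgt : ∀ q ∈ t, d < q.1 := pvRuns_cons_gt r d hs' k t hh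
      have hcle : c ≤ d := (List.pairwise_cons.mp hs).1 d (by simp)
      have hred : pvRuns (c :: d :: r) =
          if c = d then (d, k + 1) :: t else (c, 1) :: (d, k) :: t := by
        rw [pvRuns_cons, hh]
      rw [hred] at hp
      by_cases hcd : c = d
      · rw [if_pos hcd] at hp
        subst hcd
        rcases List.mem_cons.mp hp with h1 | h1
        · subst h1
          have := ih hs' (c, k) (by rw [hh]; simp)
          simp only at this
          constructor
          · simp [List.count_cons, this.1]
          · simp
        · have := ih hs' p (by rw [hh]; exact List.mem_cons_of_mem _ h1)
          have hne : p.1 ≠ c := ne_of_gt (hgt p h1)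
          refine ⟨?_, List.mem_cons_of_mem _ this.2⟩
          rw [List.count_cons, this.1]
          simp [Ne.symm hne]
      · rw [if_neg hcd] at hp
        have hclt : c < d := lt_of_le_of_ne hcle hcd
        rcases List.mem_cons.mp hp with h1 | h1
        · subst h1
          have hnotin : c ∉ d :: r := by
            intro hmem
            rcases List.mem_cons.mp hmem with h2 | h2
            · exact hcd h2
            · exact absurd hclt (not_lt.mpr ((List.pairwise_cons.mp hs').1 c h2))
          constructor
          · simp [List.count_cons, List.count_eq_zero.mpr hnotin]
          · simp
        · have := ih hs' p (by rw [hh]; exact h1)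
          have hne : p.1 ≠ c := by
            rcases List.mem_cons.mp h1 with h2 | h2
            · subst h2; exact fun h => hcd h.symm
            · exact ne_of_gt (lt_trans hclt (hgt p h2))
          refine ⟨?_, List.mem_cons_of_mem _ this.2⟩
          rw [List.count_cons, this.1]
          simp [Ne.symm hne]

theorem pvRuns_mem_fst (l : List Char) (c : Char) (hc : c ∈ l) :
    ∃ p ∈ pvRuns l, p.1 = c := by
  induction l with
  | nil => simp at hc
  | cons a rest ih =>
    rcases List.mem_cons.mp hc with h1 | h1
    · subst h1
      obtain ⟨k, t, h⟩ := pvRuns_head c rest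
      exact ⟨(c, k), by rw [h]; simp, rfl⟩
    · obtain ⟨p, hp, hfst⟩ := ih h1
      obtain ⟨d, r, rfl⟩ := List.exists_cons_of_ne_nil (List.ne_nil_of_mem h1)
      obtain ⟨k, t, hh⟩ := pvRuns_head d r
      rw [hh] at hp
      have hred : pvRuns (a :: d :: r) =
          if a = d then (d, k + 1) :: t else (a, 1) :: (d, k) :: t := by
        rw [pvRuns_cons, hh]
      rw [hred]
      by_cases had : a = d
      · rw [if_pos had]
        rcases List.mem_cons.mp hp with h2 | h2
        · refine ⟨(d, k + 1), by simp, ?_⟩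
          rw [← hfst, h2]
        · exact ⟨p, by simp [h2], hfst⟩
      · rw [if_neg had]
        exact ⟨p, by simp [List.mem_cons.mp hp], hfst⟩

-- existence of a run of length k in the sorted list ↔ a character with count k
theorem pvRuns_exists_iff (input : String) (k : Nat) :
    (∃ p ∈ pvRuns (PySem.List.sorted input.toList (fun x => x) false), p.2 = k) ↔
    (∃ c ∈ input.toList, input.toList.count c = k) := by
  set sl := PySem.List.sorted input.toList (fun x => x) false with hsl
  have hperm : sl.Perm input.toList := PySem.List.sorted_perm _ _ _
  have hsort : sl.Pairwise (· ≤ ·) := by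
    have := PySem.List.sorted_pairwise input.toList (fun x => x)
    simpa [hsl] using this
  constructor
  · rintro ⟨p, hp, hk⟩
    obtain ⟨hcount, hmem⟩ := pvRuns_count sl hsort p hp
    exact ⟨p.1, hperm.mem_iff.mp hmem, by rw [← hperm.count_eq, ← hcount, hk]⟩
  · rintro ⟨c, hc, hk⟩
    obtain ⟨p, hp, hfst⟩ := pvRuns_mem_fst sl c (hperm.mem_iff.mpr hc)
    obtain ⟨hcount, _⟩ := pvRuns_count sl hsort p hp
    exact ⟨p, hp, by rw [hcount, hfst, hperm.count_eq, hk]⟩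

-- Python str.count with a single-character needle is List.count
theorem charsCountGo_singleton (c : Char) :
    ∀ (fuel : Nat) (l : List Char) (acc : Nat), l.length ≤ fuel →
      PySem.Chars.count.go [c] fuel l acc = acc + l.count c := by
  intro fuel
  induction fuel with
  | zero =>
    intro l acc h
    have : l = [] := List.eq_nil_of_length_eq_zero (Nat.le_zero.mp h)
    subst this; simp [PySem.Chars.count.go]
  | succ n ih =>
    intro l acc h
    cases l with
    | nil => simp [PySem.Chars.count.go]
    | cons a t =>
      simp only [PySem.Chars.count.go]
      by_cases hac : c = a
      · subst hac
        have hpre : List.isPrefixOf [c] (c :: t) = true := by simp [List.isPrefixOf]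
        rw [if_pos hpre]
        simp only [List.length_cons] at h
        have := ih t (acc + 1) (Nat.le_of_succ_le_succ h)
        simpa [List.count_cons, Nat.add_comm, Nat.add_assoc, Nat.add_left_comm] using this
      · have hpre : List.isPrefixOf [c] (a :: t) = false := by
          simp [List.isPrefixOf]
          exact hac
        rw [if_neg (by simp [hpre])]
        simp only [List.length_cons] at h
        have hrec := ih t acc (Nat.le_of_succ_le_succ h)
        have hne : ¬ a = c := fun h => hac h.symm
        simp [hrec, List.count_cons, hne]

theorem charsCount_singleton (l : List Char) (c : Char) :
    PySem.Chars.count l [c] = l.count c := by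
  show PySem.Chars.count.go [c] l.length l 0 = _
  simpa using charsCountGo_singleton c l.length l 0 le_rfl

theorem alt_any_iff (input : String) (k : Nat) :
    ((PySem.Set.ofList input.toList).any
        (fun c => PySem.Str.count input (String.ofList [c]) == k) = true) ↔
    (∃ c ∈ input.toList, input.toList.count c = k) := by
  rw [List.any_eq_true]
  constructor
  · rintro ⟨c, hc, hk⟩
    refine ⟨c, by simpa [PySem.Set.mem_ofList] using hc, ?_⟩
    have := of_decide_eq_true (by simpa using hk)
    rwa [charsCount_singleton] at this
  · rintro ⟨c, hc, hk⟩
    refine ⟨c, by simpa [PySem.Set.mem_ofList] using hc, ?_⟩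
    simp [charsCount_singleton, hk]

theorem a_component_iff (input : String) (k : Nat) :
    (0 < ((pvRuns (PySem.List.sorted input.toList (fun x => x) false)).filter
        (fun p => p.2 == k)).length) ↔
    (∃ p ∈ pvRuns (PySem.List.sorted input.toList (fun x => x) false), p.2 = k) := by
  constructor
  · intro h
    obtain ⟨p, hp⟩ := List.exists_mem_of_length_pos h
    have hm := List.mem_filter.mp hp
    exact ⟨p, hm.1, by simpa using hm.2⟩
  · rintro ⟨p, hp, hk⟩
    exact List.length_pos_of_mem (List.mem_filter.mpr ⟨hp, by simpa using hk⟩)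

theorem pv_if_decide (n : Nat) : (if 0 < n then true else false) = decide (0 < n) := by
  by_cases h : 0 < n <;> simp [h]

-- ===== VERDICT (by name: the statement is the Claim_ definition above) =====
theorem get_unique_occurrences_spec : Claim_equal_get_unique_occurrences := by
  intro input _
  unfold Spec_get_unique_occurrences get_unique_occurrences get_unique_occurrences_alt
  simp only [pv_if_decide]
  have h2 : decide (0 < ((pvRuns (PySem.List.sorted input.toList (fun x => x) false)).filter
      (fun p => p.2 == 2)).length) =
      (PySem.Set.ofList input.toList).any
        (fun c => PySem.Str.count input (String.ofList [c]) == 2) := by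
    rw [Bool.eq_iff_iff, decide_eq_true_eq, a_component_iff input 2, pvRuns_exists_iff input 2]
    exact (alt_any_iff input 2).symm
  have h3 : decide (0 < ((pvRuns (PySem.List.sorted input.toList (fun x => x) false)).filter
      (fun p => p.2 == 3)).length) =
      (PySem.Set.ofList input.toList).any
        (fun c => PySem.Str.count input (String.ofList [c]) == 3) := by
    rw [Bool.eq_iff_iff, decide_eq_true_eq, a_component_iff input 3, pvRuns_exists_iff input 3]
    exact (alt_any_iff input 3).symm
  rw [h2, h3]
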